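-- pv_equiv track=rewrite | github.com/wearemimic/rapro-backend | ss_planning/utils.py | get_life_expectancy
-- ===== SOURCE A (Python) =====
-- LIFE_EXPECTANCY_TABLES = {
--     'male': {
--         60: 22.6,
--         62: 21.8,
--         65: 18.5,
--         67: 16.8,
--         70: 14.4,
--         75: 11.3,
--         80: 8.5,
--         85: 6.2,
--         90: 4.3,
--     },
--     'female': {
--         60: 25.3,
--         62: 24.3,
--         65: 21.0,
--         67: 19.2,
--         70: 16.7,
--         75: 13.4,
--         80: 10.2,
--         85: 7.4,
--         90: 5.1,
--     }
-- }
--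
-- def get_life_expectancy(current_age, gender='male', health_status='good'):
--     """
--     Get life expectancy from SSA actuarial tables with health adjustments.
--
--     Args:
--         current_age (int): Current age of person
--         gender (str): 'male' or 'female'
--         health_status (str): 'poor', 'fair', 'good', or 'excellent'
--
--     Returns:
--         int: Expected age at death
--     """
--     gender = gender.lower()
--     if gender not in ['male', 'female']:
--         gender = 'male'
--
--     table = LIFE_EXPECTANCY_TABLES.get(gender, LIFE_EXPECTANCY_TABLES['male'])
--
--     # Find closest age in table or interpolate
--     if current_age in table:
--         additional_years = table[current_age]
--     else:
--         # Interpolate between closest ages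
--         ages = sorted(table.keys())
--         if current_age < ages[0]:
--             additional_years = table[ages[0]]
--         elif current_age > ages[-1]:
--             additional_years = table[ages[-1]]
--         else:
--             # Find surrounding ages
--             for i, age in enumerate(ages):
--                 if age > current_age:
--                     lower_age = ages[i-1]
--                     upper_age = age
--                     lower_years = table[lower_age]
--                     upper_years = table[upper_age]
--
--                     # Linear interpolation
--                     ratio = (current_age - lower_age) / (upper_age - lower_age)
--                     additional_years = lower_years + ratio * (upper_years - lower_years)
--                     break
--
--     # Apply health status adjustment
--     health_adjustments = {
--         'poor': -3,
--         'fair': -1,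
--         'good': 0,
--         'excellent': 3
--     }
--     adjustment = health_adjustments.get(health_status, 0)
--
--     life_expectancy = current_age + additional_years + adjustment
--
--     return int(round(life_expectancy))
-- ===== SOURCE B (Python) =====
-- import bisect
--
-- LIFE_EXPECTANCY_TABLES = {
--     'male': {
--         60: 22.6, 62: 21.8, 65: 18.5, 67: 16.8, 70: 14.4,
--         75: 11.3, 80: 8.5, 85: 6.2, 90: 4.3,
--     },
--     'female': {
--         60: 25.3, 62: 24.3, 65: 21.0, 67: 19.2, 70: 16.7,
--         75: 13.4, 80: 10.2, 85: 7.4, 90: 5.1,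
--     }
-- }
--
-- HEALTH_ADJUSTMENTS = {'poor': -3, 'fair': -1, 'good': 0, 'excellent': 3}
--
--
-- def get_life_expectancy(current_age, gender='male', health_status='good'):
--     """Life expectancy via a single bisect-located bracket: end clamps and
--     exact table hits fall out of one interpolation formula (ratio 0 there)."""
--     table = LIFE_EXPECTANCY_TABLES.get(gender.lower(),
--                                        LIFE_EXPECTANCY_TABLES['male'])
--     ages = sorted(table)
--     i = bisect.bisect_right(ages, current_age)
--     lower = ages[max(i - 1, 0)]
--     upper = ages[min(i, len(ages) - 1)]
--     if lower == upper:
--         additional_years = table[lower]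
--     else:
--         ratio = (current_age - lower) / (upper - lower)
--         additional_years = table[lower] + ratio * (table[upper] - table[lower])
--     adjustment = HEALTH_ADJUSTMENTS.get(health_status, 0)
--     return int(round(current_age + additional_years + adjustment))
-- ===== Notes on version B (the rewrite author's own statement) =====
-- stated objective: idiomatic
-- what changed: Replaced A's exact-membership check, three-way below/above/inside branching and linear enumerate scan for the bracketing ages with a single bisect_right lookup whose bracket is clamped at both ends, so exact hits, end clamps and interpolation all fall out of one formula.
import Mathlib
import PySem

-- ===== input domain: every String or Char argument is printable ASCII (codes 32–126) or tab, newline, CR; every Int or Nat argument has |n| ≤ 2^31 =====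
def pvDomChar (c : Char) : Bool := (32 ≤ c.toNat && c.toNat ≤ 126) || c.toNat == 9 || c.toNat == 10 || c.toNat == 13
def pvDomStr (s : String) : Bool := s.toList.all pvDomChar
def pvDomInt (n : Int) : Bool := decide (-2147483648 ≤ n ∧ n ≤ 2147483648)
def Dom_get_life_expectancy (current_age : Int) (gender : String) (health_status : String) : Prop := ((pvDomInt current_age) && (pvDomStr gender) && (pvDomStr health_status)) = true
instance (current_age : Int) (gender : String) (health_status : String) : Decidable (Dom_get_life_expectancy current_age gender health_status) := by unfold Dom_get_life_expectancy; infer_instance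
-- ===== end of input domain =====

-- B replaces A's exact-membership check + three-way clamp + linear enumerate scan by one
-- bisect_right bracket with clamped endpoints, the single interpolation formula covering all cases.
--
-- FLOAT PORTING NOTE (applies to both ports): the table holds one-decimal floats and the
-- interpolation gaps are 2, 3 or 5, so every value of `additional_years` is an exact multiple
-- of 1/300; both ports carry `additional_years` scaled by 300 in exact Int arithmetic (table
-- entries scaled by 10) and `int(round(...))` becomes round-half-to-even on the scaled value.
-- On integer current_age the Python float computation rounds identically (the fractional part
-- stays far enough from any non-tie and ties are exact), so the ports are exact on Dom.

-- shared module constants (LIFE_EXPECTANCY_TABLES, health adjustment dict), values in tenths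
def pvMALE : PySem.Dict Int Int :=
  PySem.Dict.ofList [(60,226),(62,218),(65,185),(67,168),(70,144),(75,113),(80,85),(85,62),(90,43)]
def pvFEMALE : PySem.Dict Int Int :=
  PySem.Dict.ofList [(60,253),(62,243),(65,210),(67,192),(70,167),(75,134),(80,102),(85,74),(90,51)]
def pvTABLES : PySem.Dict String (PySem.Dict Int Int) :=
  PySem.Dict.ofList [("male", pvMALE), ("female", pvFEMALE)]
def pvHealthAdj : PySem.Dict String Int :=
  PySem.Dict.ofList [("poor",-3),("fair",-1),("good",0),("excellent",3)]

-- int(round(n / 300)) with Python's round-half-to-even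
def pvRound300 (n : Int) : Int :=
  let q := Int.fdiv n 300
  let r := n - 300 * q
  if 2 * r < 300 then q
  else if 300 < 2 * r then q + 1
  else if q % 2 = 0 then q else q + 1

-- ===== PORT A =====
-- A's `for i, age in enumerate(ages): if age > current_age: lower_age = ages[i-1] ...; break`,
-- carrying the previous element instead of indexing ages[i-1] (A only reaches the break with i ≥ 1,
-- so prev is always the element before). On [] (loop falls through; unreachable in A) returns 0.
def pvScanA (ca : Int) (table : PySem.Dict Int Int) (prev : Int) : List Int → Int
  | [] => 0
  | age :: rest =>
    if ca < age then
      let ly := PySem.Dict.getD table prev 0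
      let uy := PySem.Dict.getD table age 0
      -- lower_years + ratio * (upper_years - lower_years), scaled by 300 (exact: gap ∣ 30)
      30 * ly + 30 * (ca - prev) * (uy - ly) / (age - prev)
    else pvScanA ca table age rest

-- additional_years scaled by 300
def pvAdditionalA (ca : Int) (table : PySem.Dict Int Int) : Int :=
  if PySem.Dict.contains table ca then 30 * PySem.Dict.getD table ca 0
  else
    let ages := PySem.List.sorted (PySem.Dict.keys table) (fun x => x) false
    let a0 := ages.getD 0 0                       -- ages[0]  (table literal is nonempty)
    let aLast := PySem.List.pyGetD ages (-1) 0    -- ages[-1]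
    if ca < a0 then 30 * PySem.Dict.getD table a0 0
    else if aLast < ca then 30 * PySem.Dict.getD table aLast 0
    else pvScanA ca table 0 ages

def get_life_expectancy (current_age : Int) (gender : String) (health_status : String) : Int :=
  let gender1 := PySem.Str.lower gender
  let gender2 := if gender1 ∈ (["male", "female"] : List String) then gender1 else "male"
  let table := PySem.Dict.getD pvTABLES gender2 pvMALE
  let add := pvAdditionalA current_age table
  let adjustment := PySem.Dict.getD pvHealthAdj health_status 0
  pvRound300 (300 * current_age + add + 300 * adjustment)

-- ===== PORT B =====
-- additional_years scaled by 300: bisect_right bracket, ends clamped, one formula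
def pvAdditionalB (ca : Int) (table : PySem.Dict Int Int) : Int :=
  let ages := PySem.List.sorted (PySem.Dict.keys table) (fun x => x) false
  let i := PySem.List.bisectRight ages ca
  let lower := ages.getD (i - 1) 0                      -- ages[max(i-1,0)] (Nat subtraction)
  let upper := ages.getD (min i (ages.length - 1)) 0    -- ages[min(i, len-1)]
  if lower = upper then 30 * PySem.Dict.getD table lower 0
  else
    let ly := PySem.Dict.getD table lower 0
    let uy := PySem.Dict.getD table upper 0
    30 * ly + 30 * (ca - lower) * (uy - ly) / (upper - lower)

def get_life_expectancy_alt (current_age : Int) (gender : String) (health_status : String) : Int :=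
  let table := PySem.Dict.getD pvTABLES (PySem.Str.lower gender) pvMALE
  let adjustment := PySem.Dict.getD pvHealthAdj health_status 0
  pvRound300 (300 * current_age + pvAdditionalB current_age table + 300 * adjustment)

-- ===== PRECONDITION & SPEC =====
def Spec_get_life_expectancy (current_age : Int) (gender : String) (health_status : String) (out : Int) : Prop := out = get_life_expectancy_alt current_age gender health_status
instance (current_age : Int) (gender : String) (health_status : String) (out : Int) : Decidable (Spec_get_life_expectancy current_age gender health_status out) := by unfold Spec_get_life_expectancy; infer_instance

-- ===== CLAIM (what is proved, stated in full; the proofs are below) =====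
def Claim_equal_get_life_expectancy : Prop := ∀ (current_age : Int) (gender : String) (health_status : String), Dom_get_life_expectancy current_age gender health_status → Spec_get_life_expectancy current_age gender health_status (get_life_expectancy current_age gender health_status)

-- ===== LEMMAS AND PROOFS =====

def pvAges : List Int := [60,62,65,67,70,75,80,85,90]

theorem pvMALE_mk : pvMALE = PySem.Dict.mk [(60,226),(62,218),(65,185),(67,168),(70,144),(75,113),(80,85),(85,62),(90,43)] := by decide

theorem pvFEMALE_mk : pvFEMALE = PySem.Dict.mk [(60,253),(62,243),(65,210),(67,192),(70,167),(75,134),(80,102),(85,74),(90,51)] := by decide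

theorem pvTABLES_mk : pvTABLES = PySem.Dict.mk [("male", pvMALE), ("female", pvFEMALE)] := by
  rw [pvTABLES, PySem.Dict.ofList]; decide

theorem pvAges_sorted (t : PySem.Dict Int Int) (h : t = pvMALE ∨ t = pvFEMALE) :
    PySem.List.sorted (PySem.Dict.keys t) (fun x => x) false = pvAges := by
  rcases h with h | h <;> subst h <;> decide

theorem pvBisect_lo {ca : Int} (h : ca < 60) : PySem.List.bisectRight pvAges ca = 0 := by
  have hs := PySem.List.bisectRight_spec pvAges ca (by decide)
  by_contra hne
  have h1 : 0 < PySem.List.bisectRight pvAges ca := Nat.pos_of_ne_zero hne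
  have h2 := hs.2.1 0 (by decide) h1
  have h3 : (60 : Int) ≤ ca := by simpa [pvAges] using h2
  omega

theorem pvBisect_hi {ca : Int} (h : 90 < ca) : PySem.List.bisectRight pvAges ca = 9 := by
  have hs := PySem.List.bisectRight_spec pvAges ca (by decide)
  have hlen : pvAges.length = 9 := by decide
  by_contra hne
  have h1 : PySem.List.bisectRight pvAges ca ≤ 8 := by
    have := hs.1; omega
  have h2 := hs.2.2 8 (by decide) h1
  have h3 : ca < 90 := by simpa [pvAges] using h2
  omega

theorem pvContains_out {ca : Int} (t : PySem.Dict Int Int) (ht : t = pvMALE ∨ t = pvFEMALE)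
    (h : ca < 60 ∨ 90 < ca) : PySem.Dict.contains t ca = false := by
  rcases ht with h' | h' <;> subst h' <;>
    [simp [pvMALE_mk, PySem.Dict.contains]; simp [pvFEMALE_mk, PySem.Dict.contains]] <;>
    omega

theorem pvAddEq (ca : Int) (t : PySem.Dict Int Int) (ht : t = pvMALE ∨ t = pvFEMALE) :
    pvAdditionalA ca t = pvAdditionalB ca t := by
  rcases lt_or_ge ca 60 with hlo | hge
  · -- below the table: both clamp to the first age
    rw [pvAdditionalA, pvAdditionalB, pvAges_sorted t ht, pvContains_out t ht (Or.inl hlo),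
        pvBisect_lo hlo]
    simp [pvAges, hlo]
  · rcases lt_or_ge 90 ca with hhi | hle
    · -- above the table: both clamp to the last age
      rw [pvAdditionalA, pvAdditionalB, pvAges_sorted t ht, pvContains_out t ht (Or.inr hhi),
          pvBisect_hi hhi]
      simp [pvAges, PySem.List.pyGetD, show ¬ ca < 60 by omega, hhi,
            show PySem.List.pyGet? ([60,62,65,67,70,75,80,85,90] : List Int) (-1) = some 90 from by decide]
    · -- inside the table: finitely many integer ages
      rcases ht with h' | h' <;> subst h' <;> interval_cases ca <;> decide

theorem pvTableSel (s : String) :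
    PySem.Dict.getD pvTABLES (if s ∈ (["male", "female"] : List String) then s else "male") pvMALE
      = PySem.Dict.getD pvTABLES s pvMALE := by
  by_cases h1 : s = "male"
  · simp [h1]
  · by_cases h2 : s = "female"
    · simp [h2]
    · simp [h1, h2, pvTABLES_mk, PySem.Dict.getD, PySem.Dict.get?,
            show ("male" : String) ≠ s from fun hh => h1 hh.symm,
            show ("female" : String) ≠ s from fun hh => h2 hh.symm]

theorem pvTable_cases (s : String) :
    PySem.Dict.getD pvTABLES s pvMALE = pvMALE ∨ PySem.Dict.getD pvTABLES s pvMALE = pvFEMALE := by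
  by_cases h1 : s = "male"
  · left; simp [h1, pvTABLES_mk, PySem.Dict.getD, PySem.Dict.get?]
  · by_cases h2 : s = "female"
    · right; simp [h2, pvTABLES_mk, PySem.Dict.getD, PySem.Dict.get?]
    · left
      simp [pvTABLES_mk, PySem.Dict.getD, PySem.Dict.get?,
            show ("male" : String) ≠ s from fun hh => h1 hh.symm,
            show ("female" : String) ≠ s from fun hh => h2 hh.symm]

-- ===== VERDICT (by name: the statement is the Claim_ definition above) =====
theorem get_life_expectancy_spec : Claim_equal_get_life_expectancy := by
  intro ca g h _
  simp only [Spec_get_life_expectancy, get_life_expectancy, get_life_expectancy_alt]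
  rw [pvTableSel, pvAddEq ca _ (pvTable_cases (PySem.Str.lower g))]
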